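-- pv_equiv track=rewrite | github.com/bterwijn/Lectures_en_Lesroosters_SQL | src/activity_gap.py | count_gaps
-- ===== SOURCE A (Python) =====
-- def count_gaps(gaps, day, all_hours):
--     hours = {int(h) for h in day.split(',')}
--     if len(hours) > 1:
--         gap = 0
--         active = False
--         for i in all_hours:
--             if i in hours:
--                 active = True
--                 if gap > 0:
--                     gaps[gap-1] += 1
--                     gap = 0
--             else:
--                 if active:
--                     gap += 1
--     return gaps
-- ===== SOURCE B (Python) =====
-- def count_gaps(gaps, day, all_hours):
--     hours = {int(h) for h in day.split(',')}
--     if len(hours) > 1: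
--         positions = [i for i, h in enumerate(all_hours) if h in hours]
--         for prev, cur in zip(positions, positions[1:]):
--             g = cur - prev - 1
--             if g > 0:
--                 gaps[g - 1] += 1
--     return gaps
-- ===== Notes on version B (the rewrite author's own statement) =====
-- stated objective: alternative
-- what changed: Replaces A's running active/gap state machine over all_hours with two declarative passes: collect the indices of active hours via enumerate, then difference consecutive index pairs and bump gaps[gap-1] for each positive difference.
import Mathlib
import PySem

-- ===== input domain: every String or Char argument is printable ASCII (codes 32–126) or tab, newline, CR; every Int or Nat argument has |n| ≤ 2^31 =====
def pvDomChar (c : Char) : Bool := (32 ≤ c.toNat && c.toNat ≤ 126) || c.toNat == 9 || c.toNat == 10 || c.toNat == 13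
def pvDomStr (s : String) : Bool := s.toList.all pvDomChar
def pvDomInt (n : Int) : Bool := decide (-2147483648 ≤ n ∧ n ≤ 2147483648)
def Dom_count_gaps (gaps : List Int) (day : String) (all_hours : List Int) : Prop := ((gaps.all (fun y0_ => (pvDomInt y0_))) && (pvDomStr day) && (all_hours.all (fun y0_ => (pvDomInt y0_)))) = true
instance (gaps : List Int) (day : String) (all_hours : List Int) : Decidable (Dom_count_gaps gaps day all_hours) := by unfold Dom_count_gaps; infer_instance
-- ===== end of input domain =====

-- B replaces A's running active/gap state machine by collecting the active indices and
-- differencing adjacent pairs (objective: alternative decomposition, same O(n) cost).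
-- Python A and B both mutate `gaps` in place and return it; the equivalence proved here
-- is about the RETURN value (B performs the same in-place updates as A).

-- ===== PORT A =====
-- shared by both ports (both Pythons have the identical line `hours = {int(h) for h in day.split(',')}`):
-- int(h) may raise ValueError; `(ofStr? h).getD 0` is the total form, exact under Pre_'s parse condition
def cgHours (day : String) : PySem.Set Int :=
  PySem.Set.ofList (((PySem.Str.split? day ",").getD []).map (fun h => (PySem.Int.ofStr? h).getD 0))

-- the for-loop over all_hours with state (gaps, gap, active); `gaps[gap-1] += 1` is the
-- total pyGetD/pySetD form, exact under Pre_'s in-range condition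
def cgLoop (hours : PySem.Set Int) : List Int → List Int × Int × Bool → List Int × Int × Bool
  | [], s => s
  | i :: rest, (g, gap, active) =>
      if hours.contains i then
        cgLoop hours rest
          ((if gap > 0 then PySem.List.pySetD g (gap - 1) (PySem.List.pyGetD g (gap - 1) 0 + 1) else g),
           0, true)
      else
        cgLoop hours rest (g, (if active then gap + 1 else gap), active)

def count_gaps (gaps : List Int) (day : String) (all_hours : List Int) : List Int :=
  let hours := cgHours day
  if 1 < hours.length then (cgLoop hours all_hours (gaps, 0, false)).1 else gaps

-- ===== PORT B =====
-- positions = [i for i, h in enumerate(all_hours) if h in hours]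
def cgPositions (day : String) (all_hours : List Int) : List Int :=
  ((PySem.List.enumerate all_hours).filter (fun p => (cgHours day).contains p.2)).map (fun p => p.1)

def count_gaps_alt (gaps : List Int) (day : String) (all_hours : List Int) : List Int :=
  if 1 < (cgHours day).length then
    let positions := cgPositions day all_hours
    (positions.zip positions.tail).foldl
      (fun g pc =>
        let d := pc.2 - pc.1 - 1
        if d > 0 then PySem.List.pySetD g (d - 1) (PySem.List.pyGetD g (d - 1) 0 + 1) else g)
      gaps
  else gaps

-- ===== PRECONDITION & SPEC =====
-- Pre_ excludes exactly the inputs where Python A raises: a comma-piece of `day` that int()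
-- rejects (ValueError), and an inter-active gap wider than `gaps` (IndexError on gaps[gap-1]).
def Pre_count_gaps (gaps : List Int) (day : String) (all_hours : List Int) : Prop :=
  (∀ h ∈ (PySem.Str.split? day ",").getD [], (PySem.Int.ofStr? h).isSome = true) ∧
  (1 < (cgHours day).length →
    ∀ pc ∈ (cgPositions day all_hours).zip (cgPositions day all_hours).tail,
      pc.2 - pc.1 - 1 ≤ (gaps.length : Int))
instance (gaps : List Int) (day : String) (all_hours : List Int) : Decidable (Pre_count_gaps gaps day all_hours) := by unfold Pre_count_gaps; infer_instance

def pvWitness_count_gaps : List Int × String × List Int := ([0, 0, 0], "1,3", [1, 2, 3])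

def Spec_count_gaps (gaps : List Int) (day : String) (all_hours : List Int) (out : List Int) : Prop := out = count_gaps_alt gaps day all_hours
instance (gaps : List Int) (day : String) (all_hours : List Int) (out : List Int) : Decidable (Spec_count_gaps gaps day all_hours out) := by unfold Spec_count_gaps; infer_instance

-- ===== CLAIM (what is proved, stated in full; the proofs are below) =====
def Claim_equal_count_gaps : Prop := ∀ (gaps : List Int) (day : String) (all_hours : List Int), Dom_count_gaps gaps day all_hours → Pre_count_gaps gaps day all_hours → Spec_count_gaps gaps day all_hours (count_gaps gaps day all_hours)

-- ===== LEMMAS AND PROOFS =====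

-- proof-only vocabulary: one emitted gap update, the list of inter-active gap sizes,
-- and the active positions starting at index n
def cgEmit (g : List Int) (d : Int) : List Int :=
  if d > 0 then PySem.List.pySetD g (d - 1) (PySem.List.pyGetD g (d - 1) 0 + 1) else g

def cgSizes (hours : PySem.Set Int) : Int → List Int → List Int
  | _, [] => []
  | d, i :: rest => if hours.contains i then d :: cgSizes hours 0 rest else cgSizes hours (d + 1) rest

def cgPosFrom (hours : PySem.Set Int) : Int → List Int → List Int
  | _, [] => []
  | n, i :: rest =>
      if hours.contains i then n :: cgPosFrom hours (n + 1) rest else cgPosFrom hours (n + 1) rest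

def cgDiffs (xs : List Int) : List Int :=
  (xs.zip xs.tail).map (fun pc => pc.2 - pc.1 - 1)

lemma cgLoop_active (hours : PySem.Set Int) (l : List Int) :
    ∀ (g : List Int) (d : Int),
      (cgLoop hours l (g, d, true)).1 = (cgSizes hours d l).foldl cgEmit g := by
  induction l with
  | nil => intro g d; simp [cgLoop, cgSizes]
  | cons i rest ih =>
      intro g d
      by_cases h : i ∈ hours
      · simp [cgLoop, cgSizes, h, ih, cgEmit]
      · simp [cgLoop, cgSizes, h, ih]

lemma cgDiffs_cons (hours : PySem.Set Int) (l : List Int) :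
    ∀ (n prev : Int), cgDiffs (prev :: cgPosFrom hours n l) = cgSizes hours (n - prev - 1) l := by
  induction l with
  | nil => intro n prev; simp [cgPosFrom, cgSizes, cgDiffs]
  | cons i rest ih =>
      intro n prev
      by_cases h : i ∈ hours
      · have h2 : cgDiffs (n :: cgPosFrom hours (n + 1) rest) = cgSizes hours 0 rest := by
          simpa using ih (n + 1) n
        simp [cgPosFrom, cgSizes, cgDiffs, h] at h2 ⊢
        exact h2
      · simp [cgPosFrom, cgSizes, h]
        rw [ih (n + 1) prev]
        congr 1
        ring

lemma cgLoop_inactive (hours : PySem.Set Int) (l : List Int) :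
    ∀ (g : List Int) (n : Int),
      (cgLoop hours l (g, 0, false)).1 = (cgDiffs (cgPosFrom hours n l)).foldl cgEmit g := by
  induction l with
  | nil => intro g n; simp [cgLoop, cgPosFrom, cgDiffs]
  | cons i rest ih =>
      intro g n
      by_cases h : i ∈ hours
      · have h2 : cgDiffs (n :: cgPosFrom hours (n + 1) rest) = cgSizes hours 0 rest := by
          simpa using cgDiffs_cons hours rest (n + 1) n
        simp [cgLoop, cgPosFrom, h, h2, cgLoop_active]
      · simp [cgLoop, cgPosFrom, h, ih _ (n + 1)]

lemma cgPositions_eq (day : String) (all_hours : List Int) :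
    cgPositions day all_hours = cgPosFrom (cgHours day) 0 all_hours := by
  unfold cgPositions
  generalize cgHours day = hours
  suffices h : ∀ (l : List Int) (n : Int),
      ((PySem.List.enumerate l n).filter (fun p => hours.contains p.2)).map (fun p => p.1)
        = cgPosFrom hours n l from h all_hours 0
  intro l
  induction l with
  | nil => intro n; simp [PySem.List.enumerate, cgPosFrom]
  | cons i rest ih =>
      intro n
      have ih' := ih (n + 1)
      simp at ih'
      by_cases h : i ∈ hours
      · simp [PySem.List.enumerate, cgPosFrom, h, ih']
      · simp [PySem.List.enumerate, cgPosFrom, h, ih']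

lemma count_gaps_alt_eq_fold (gaps : List Int) (day : String) (all_hours : List Int)
    (hlen : 1 < (cgHours day).length) :
    count_gaps_alt gaps day all_hours
      = (cgDiffs (cgPositions day all_hours)).foldl cgEmit gaps := by
  unfold count_gaps_alt
  rw [if_pos hlen]
  unfold cgDiffs
  rw [List.foldl_map]
  rfl

-- ===== VERDICT (by name: the statement is the Claim_ definition above) =====
theorem count_gaps_spec : Claim_equal_count_gaps := by
  intro gaps day all_hours _hdom _hpre
  unfold Spec_count_gaps count_gaps
  by_cases hlen : 1 < (cgHours day).length
  · simp only [hlen, if_true]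
    rw [count_gaps_alt_eq_fold gaps day all_hours hlen, cgPositions_eq,
      cgLoop_inactive (cgHours day) all_hours gaps 0]
  · simp only [hlen, if_false]
    unfold count_gaps_alt
    rw [if_neg hlen]
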